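-- pv_equiv track=rewrite | github.com/jevmydev/aprendiendo-python | practice/own/is_single_change_num.py | is_single_change_num
-- ===== SOURCE A (Python) =====
-- def is_single_change_num(num: int):
--     iterable_num = str(num)
--     len_iterable_num = len(iterable_num)
--
--     if len_iterable_num < 3:
--         return False
--
--     was_increasing = None
--     times_to_change_tendency = 0
--
--     for i, iterable_digit in enumerate(iterable_num):
--         if i == 0: continue
--
--         digit = int(iterable_digit)
--         last_digit = int(iterable_num[i - 1])
--
--         if digit == last_digit:
--             return False
--
--         is_increment = last_digit < digit
--
--         if i == 1: was_increasing = is_increment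
--
--         if is_increment:
--             if was_increasing: continue
--
--             times_to_change_tendency += 1
--             was_increasing = True
--         else:
--             if not was_increasing: continue
--
--             times_to_change_tendency += 1
--             was_increasing = False
--
--     return times_to_change_tendency == 1
-- ===== SOURCE B (Python) =====
-- def _strict_peak(d):
--     # d is a strict "mountain": strictly increasing up to its maximum,
--     # strictly decreasing after it, with the maximum strictly inside.
--     k = d.index(max(d))
--     left = d[:k + 1]
--     right = d[k:]
--     return (0 < k < len(d) - 1
--             and all(a < b for a, b in zip(left, left[1:]))
--             and all(a > b for a, b in zip(right, right[1:])))
--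
--
-- def is_single_change_num(num: int):
--     s = str(num)
--     if len(s) < 3:
--         return False
--     digits = [int(c) for c in s]
--     # exactly one tendency change <=> strict peak or strict valley
--     return _strict_peak(digits) or _strict_peak([-d for d in digits])
-- ===== Notes on version B (the rewrite author's own statement) =====
-- stated objective: alternative
-- what changed: Replaces A's single stateful pass that counts tendency changes with a shape test: locate the index of the extremum (max for a peak, max of the negated digits for a valley) and verify the digits are strictly monotone on each side of it with the extremum strictly interior.
-- outside the precondition, e.g. on is_single_change_num(-10): A raises ValueError, B raises ValueError
import Mathlib
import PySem

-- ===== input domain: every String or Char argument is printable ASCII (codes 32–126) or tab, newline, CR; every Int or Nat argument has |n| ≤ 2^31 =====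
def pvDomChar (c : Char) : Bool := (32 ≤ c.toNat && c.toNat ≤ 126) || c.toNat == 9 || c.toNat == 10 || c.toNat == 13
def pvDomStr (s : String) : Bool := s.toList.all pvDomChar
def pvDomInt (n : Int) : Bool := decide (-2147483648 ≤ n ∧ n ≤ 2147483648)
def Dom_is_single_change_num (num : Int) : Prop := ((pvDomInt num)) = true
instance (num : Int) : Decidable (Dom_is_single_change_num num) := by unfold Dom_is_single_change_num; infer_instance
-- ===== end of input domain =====

-- B replaces A's stateful transition-counting pass by a shape test: exactly one tendency
-- change means the digits form a strict peak (strictly up then strictly down) or a strict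
-- valley; B locates the extremum by index-of-max (of the digits, resp. the negated digits)
-- and checks strict monotonicity on each side. Objective: alternative. Equivalence is
-- claimed on num > -10 (Pre_), where neither Python raises.

-- ===== PORT A =====
-- int(c) for a single character; exact on digit characters (the only ones reached inside
-- Pre_: int('-') would be a ValueError in Python, excluded by Pre_).
def pyIntChar (c : Char) : Int := (PySem.Int.ofStr? (String.mk [c])).getD 0

-- A's for-loop over enumerate(str(num)); 'none' = the early 'return False' on equal digits.
def isc_loop (s : List Char) : List (Int × Char) → Option Bool → Int → Option Int
  | [], _, count => some count
  | (i, ch) :: rest, was, count =>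
    if i = 0 then isc_loop s rest was count
    else
      let digit := pyIntChar ch
      let last := pyIntChar ((PySem.List.pyGet? s (i - 1)).getD ' ')
      if digit = last then none
      else
        let isInc : Bool := decide (last < digit)
        let was' := if i = 1 then some isInc else was
        if isInc then
          if was' = some true then isc_loop s rest was' count
          else isc_loop s rest (some true) (count + 1)
        else
          if was' = some true then isc_loop s rest (some false) (count + 1)
          else isc_loop s rest was' count

def is_single_change_num (num : Int) : Bool :=
  let s := (PySem.Int.toStr num).toList
  if s.length < 3 then false
  else
    match isc_loop s (PySem.List.enumerate s) none 0 with
    | none => false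
    | some c => c == 1

-- ===== PORT B =====
-- d.index(max(d)) from Source B; max(d) is a member of d, so the Option defaults are never
-- taken on the nonempty lists this is called on.
def strict_peak (d : List Int) : Bool :=
  let k := (PySem.List.index? d ((PySem.List.max? d (fun y => y)).getD 0)).getD 0
  let left := PySem.List.slice d none (some ((k : Int) + 1))
  let right := PySem.List.slice d (some (k : Int)) none
  decide (0 < k) && decide ((k : Int) < (d.length : Int) - 1)
    && (left.zip left.tail).all (fun p => decide (p.1 < p.2))
    && (right.zip right.tail).all (fun p => decide (p.1 > p.2))

def is_single_change_num_alt (num : Int) : Bool :=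
  let s := (PySem.Int.toStr num).toList
  if s.length < 3 then false
  else
    let digits := s.map pyIntChar
    strict_peak digits || strict_peak (digits.map (fun x => -x))

-- ===== PRECONDITION & SPEC =====
-- Pre_ excludes num ≤ -10: there str(num) has at least three characters and both Pythons raise
-- ValueError at int('-').
def Pre_is_single_change_num (num : Int) : Prop := -10 < num
instance (num : Int) : Decidable (Pre_is_single_change_num num) := by unfold Pre_is_single_change_num; infer_instance
def pvWitness_is_single_change_num : Int := (121)

def Spec_is_single_change_num (num : Int) (out : Bool) : Prop := out = is_single_change_num_alt num
instance (num : Int) (out : Bool) : Decidable (Spec_is_single_change_num num out) := by unfold Spec_is_single_change_num; infer_instance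

-- ===== CLAIM (what is proved, stated in full; the proofs are below) =====
def Claim_equal_is_single_change_num : Prop := ∀ (num : Int), Dom_is_single_change_num num → Pre_is_single_change_num num → Spec_is_single_change_num num (is_single_change_num num)

-- ===== LEMMAS AND PROOFS =====

-- ---- A-side: index-free version of A's loop ----
def pairLoop : Int → Char → List Char → Option Bool → Int → Option Int
  | _, _, [], _, count => some count
  | i, prev, ch :: rest, was, count =>
    let digit := pyIntChar ch
    let last := pyIntChar prev
    if digit = last then none
    else
      let isInc : Bool := decide (last < digit)
      let was' := if i = 1 then some isInc else was
      if isInc then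
        if was' = some true then pairLoop (i+1) ch rest was' count
        else pairLoop (i+1) ch rest (some true) (count + 1)
      else
        if was' = some true then pairLoop (i+1) ch rest (some false) (count + 1)
        else pairLoop (i+1) ch rest was' count

def diffsOf : Char → List Char → List Int
  | _, [] => []
  | p, c :: r => (pyIntChar c - pyIntChar p) :: diffsOf c r

def transCount : Bool → List Bool → Int
  | _, [] => 0
  | w, b :: bs => (if b ≠ w then 1 else 0) + transCount b bs

theorem isc_loop_eq_pairLoop (rest : List Char) :
    ∀ (pre : List Char) (prev : Char) (was : Option Bool) (count : Int),
    isc_loop (pre ++ prev :: rest) (PySem.List.enumerate rest ((pre.length : Int) + 1)) was count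
      = pairLoop ((pre.length : Int) + 1) prev rest was count := by
  induction rest with
  | nil => intro pre prev was count; simp [PySem.List.enumerate_nil, isc_loop, pairLoop]
  | cons ch rest' ih =>
    intro pre prev was count
    rw [PySem.List.enumerate_cons]
    have hne : ¬ (((pre.length : Int) + 1) = 0) := by omega
    have hget : (PySem.List.pyGet? (pre ++ prev :: ch :: rest')
        (((pre.length : Int) + 1) - 1)).getD ' ' = prev := by
      have h1 : ((pre.length : Int) + 1) - 1 = (pre.length : Int) := by omega
      rw [h1, PySem.List.pyGet?_append_length pre (ch :: rest') prev]; rfl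
    have hrec : ∀ (was₂ : Option Bool) (count₂ : Int),
        isc_loop (pre ++ prev :: ch :: rest')
          (PySem.List.enumerate rest' ((pre.length : Int) + 1 + 1)) was₂ count₂
          = pairLoop ((pre.length : Int) + 1 + 1) ch rest' was₂ count₂ := by
      intro was₂ count₂
      have := ih (pre ++ [prev]) ch was₂ count₂
      simpa [List.append_assoc, add_comm, add_left_comm, add_assoc] using this
    simp only [isc_loop, pairLoop, if_neg hne, hget]
    split_ifs <;> first | rfl | (apply hrec) | omega

theorem pairLoop_some (rest : List Char) :
    ∀ (prev : Char) (i : Int) (w : Bool) (count : Int), 2 ≤ i →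
    pairLoop i prev rest (some w) count
      = (if (diffsOf prev rest).any (fun d => d == 0) then none
         else some (count + transCount w ((diffsOf prev rest).map (fun d => decide (0 < d))))) := by
  induction rest with
  | nil => intro prev i w count _; simp [pairLoop, diffsOf, transCount]
  | cons ch rest' ih =>
    intro prev i w count hi
    have hne : ¬ (i = 1) := by omega
    by_cases heq : pyIntChar ch = pyIntChar prev
    · simp [pairLoop, diffsOf, heq, sub_eq_zero]
    · have hd : ¬ ((pyIntChar ch - pyIntChar prev) == 0) = true := by
        simp [sub_eq_zero]; exact heq
      have hsign : decide (pyIntChar prev < pyIntChar ch)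
          = decide (0 < pyIntChar ch - pyIntChar prev) := by
        simp only [decide_eq_decide]; omega
      simp only [pairLoop, heq, if_false, hne]
      by_cases hinc : (decide (pyIntChar prev < pyIntChar ch) : Bool) = true
      · by_cases hw : w = true
        · simp only [hinc, hw, if_true, if_pos rfl]
          rw [ih ch (i+1) true count (by omega)]
          simp [diffsOf, hd, transCount, ← hsign, hinc, hw]
        · simp only [hinc, if_true, hw]
          rw [if_neg (show ¬ ((some false : Option Bool) = some true) by simp),
            ih ch (i+1) true (count + 1) (by omega)]
          simp [diffsOf, hd, transCount, ← hsign, hinc, hw]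
          split_ifs <;> simp <;> ring
      · have hincF : (decide (pyIntChar prev < pyIntChar ch) : Bool) = false := by
          simpa using hinc
        by_cases hw : w = true
        · simp only [hincF, Bool.false_eq_true, if_false, hw, if_pos rfl]
          rw [ih ch (i+1) false (count + 1) (by omega)]
          simp [diffsOf, hd, transCount, ← hsign, hincF, hw]
          split_ifs <;> simp <;> ring
        · simp only [hincF, Bool.false_eq_true, if_false, hw]
          rw [if_neg (show ¬ ((some false : Option Bool) = some true) by simp),
            ih ch (i+1) false count (by omega)]
          simp [diffsOf, hd, transCount, ← hsign, hincF]
    termination_by rest => rest.length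

theorem isc_loop_zero (s : List Char) (ch : Char) (items : List (Int × Char))
    (was : Option Bool) (count : Int) :
    isc_loop s ((0, ch) :: items) was count = isc_loop s items was count := by
  simp [isc_loop]

-- ---- B-side lemmas: diffs, transition counts, peak shapes ----

def diffI : Int → List Int → List Int
  | _, [] => []
  | p, x :: r => (x - p) :: diffI x r

theorem transCount_nonneg (bs : List Bool) : ∀ w, 0 ≤ transCount w bs := by
  induction bs with
  | nil => intro w; simp [transCount]
  | cons b bs ih => intro w; have := ih b; simp [transCount]; split_ifs <;> omega

theorem diffsOf_eq_diffI (r : List Char) : ∀ (p : Char),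
    diffsOf p r = diffI (pyIntChar p) (r.map pyIntChar) := by
  induction r with
  | nil => intro p; rfl
  | cons c r ih => intro p; simp [diffsOf, diffI, ih c]

theorem diffI_split (t : List Int) : ∀ (p : Int) (k : Nat), k ≤ t.length →
    diffI p t = diffI p (t.take k) ++ diffI ((p :: t).getD k 0) (t.drop k) := by
  induction t with
  | nil =>
    intro p k hk
    have hk0 : k = 0 := by simpa using hk
    subst hk0; simp [diffI]
  | cons x r ih =>
    intro p k hk
    cases k with
    | zero => simp [diffI]
    | succ k =>
      simp only [List.take_succ_cons, List.drop_succ_cons, diffI, List.getD_cons_succ,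
        List.cons_append]
      rw [← ih x k (by simpa using hk)]

theorem diffI_length (r : List Int) : ∀ p, (diffI p r).length = r.length := by
  induction r with
  | nil => intro p; rfl
  | cons x r ih => intro p; simp [diffI, ih x]

theorem diffI_map_neg (r : List Int) : ∀ p,
    diffI (-p) (r.map (fun x => -x)) = (diffI p r).map (fun x => -x) := by
  induction r with
  | nil => intro p; rfl
  | cons x r ih => intro p; simp [diffI, ← ih x]; ring

theorem diffI_getD (r : List Int) : ∀ (p : Int) (i : Nat), i < r.length →
    (diffI p r).getD i 0 = (p :: r).getD (i+1) 0 - (p :: r).getD i 0 := by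
  induction r with
  | nil => intro p i h; simp at h
  | cons x r ih =>
    intro p i h
    cases i with
    | zero => simp [diffI]
    | succ i => simpa [diffI] using ih x i (by simpa using h)

theorem zipall_lt (r : List Int) : ∀ (p : Int),
    (((p :: r).zip ((p :: r).tail)).all (fun q => decide (q.1 < q.2)))
      = (diffI p r).all (fun x => decide (0 < x)) := by
  induction r with
  | nil => intro p; rfl
  | cons x r ih =>
    intro p
    have h := ih x
    simp only [List.tail_cons] at h ⊢
    simp only [List.zip_cons_cons, List.all_cons, diffI, h]
    congr 1
    simp only [decide_eq_decide]; omega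

theorem zipall_gt (r : List Int) : ∀ (p : Int),
    (((p :: r).zip ((p :: r).tail)).all (fun q => decide (q.1 > q.2)))
      = (diffI p r).all (fun x => decide (x < 0)) := by
  induction r with
  | nil => intro p; rfl
  | cons x r ih =>
    intro p
    have h := ih x
    simp only [List.tail_cons] at h ⊢
    simp only [List.zip_cons_cons, List.all_cons, diffI, h]
    congr 1
    simp only [gt_iff_lt, decide_eq_decide]; omega

theorem transCount_zero (bs : List Bool) : ∀ w,
    transCount w bs = 0 ↔ bs = List.replicate bs.length w := by
  induction bs with
  | nil => intro w; simp [transCount]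
  | cons b bs ih =>
    intro w
    simp only [transCount, List.length_cons, List.replicate_succ, List.cons.injEq]
    by_cases hb : b = w
    · subst hb
      simp [ih b]
    · have h1 := transCount_nonneg bs b
      rw [if_pos hb]
      constructor
      · intro h; omega
      · rintro ⟨h, -⟩; exact absurd h hb

theorem transCount_one (bs : List Bool) : ∀ w,
    transCount w bs = 1 ↔ ∃ i j : Nat, bs = List.replicate i w ++ List.replicate (j+1) (!w) := by
  induction bs with
  | nil =>
    intro w
    simp only [transCount]
    constructor
    · omega
    · rintro ⟨i, j, h⟩
      exact absurd h.symm (by simp)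
  | cons b bs ih =>
    intro w
    by_cases hb : b = w
    · subst hb
      have hne : ¬ (b ≠ b) := by simp
      simp only [transCount, if_neg hne, zero_add, ih b]
      constructor
      · rintro ⟨i, j, h⟩
        exact ⟨i + 1, j, by simp [List.replicate_succ, h]⟩
      · rintro ⟨i, j, h⟩
        cases i with
        | zero =>
          exfalso
          rw [List.replicate_zero, List.nil_append, List.replicate_succ] at h
          have hb : b = !b := by injection h
          simp at hb
        | succ i =>
          rw [List.replicate_succ, List.cons_append] at h
          exact ⟨i, j, by injection h⟩
    · have hbw : b = !w := by cases b <;> cases w <;> simp_all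
      subst hbw
      have hne : ((!w) ≠ w) := by cases w <;> simp
      simp only [transCount, if_pos hne]
      constructor
      · intro h
        have h0 : transCount (!w) bs = 0 := by omega
        rw [transCount_zero] at h0
        exact ⟨0, bs.length, by simpa [List.replicate_succ] using h0⟩
      · rintro ⟨i, j, h⟩
        cases i with
        | zero =>
          simp only [List.replicate_zero, List.nil_append, List.replicate_succ,
            List.cons.injEq, true_and] at h
          have h0 : transCount (!w) bs = 0 := by
            rw [transCount_zero, h]; simp
          omega
        | succ i =>
          exfalso
          simp only [List.replicate_succ, List.cons_append, List.cons.injEq] at h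
          exact hne h.1

def PeakShape (h : Int) (t : List Int) : Prop :=
  ∃ a b : List Int, diffI h t = a ++ b ∧ a ≠ [] ∧ b ≠ [] ∧
    (∀ x ∈ a, 0 < x) ∧ (∀ x ∈ b, x < 0)

theorem chain_up (g : Nat → Int) (p q : Nat) (hpq : p < q)
    (hstep : ∀ i, p ≤ i → i < q → g i < g (i+1)) : g p < g q := by
  induction q with
  | zero => omega
  | succ n ih =>
    by_cases hp : p = n
    · subst hp; exact hstep p le_rfl (by omega)
    · exact lt_trans (ih (by omega) (fun i h1 h2 => hstep i h1 (by omega)))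
        (hstep n (by omega) (by omega))

theorem chain_down (g : Nat → Int) (p q : Nat) (hpq : p < q)
    (hstep : ∀ i, p ≤ i → i < q → g (i+1) < g i) : g q < g p := by
  induction q with
  | zero => omega
  | succ n ih =>
    by_cases hp : p = n
    · subst hp; exact hstep p le_rfl (by omega)
    · exact lt_trans (hstep n (by omega) (by omega))
        (ih (by omega) (fun i h1 h2 => hstep i h1 (by omega)))

theorem slice_take_cons (h : Int) (t : List Int) (k : Nat) :
    PySem.List.slice (h :: t) none (some ((k : Int) + 1)) = h :: t.take k := by
  have h1 : ((k : Int) + 1) = ((k + 1 : Nat) : Int) := by push_cast; ring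
  rw [h1, PySem.List.slice_to_natCast, List.take_succ_cons]

theorem strict_peak_iff (h : Int) (t : List Int) :
    strict_peak (h :: t) = true ↔ PeakShape h t := by
  constructor
  · intro hsp
    simp only [strict_peak, Bool.and_eq_true, decide_eq_true_eq] at hsp
    obtain ⟨⟨⟨hk0, hk1⟩, hleft⟩, hright⟩ := hsp
    set k := (PySem.List.index? (h :: t)
      ((PySem.List.max? (h :: t) (fun y => y)).getD 0)).getD 0 with hkdef
    have hkn : k < t.length := by
      have : ((h :: t).length : Int) = (t.length : Int) + 1 := by simp
      omega
    have hklen : k < (h :: t).length := by simp; omega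
    rw [slice_take_cons] at hleft
    rw [PySem.List.slice_from_natCast, List.drop_eq_getElem_cons hklen,
      List.drop_succ_cons] at hright
    rw [zipall_lt] at hleft
    rw [zipall_gt] at hright
    rw [List.all_eq_true] at hleft hright
    refine ⟨diffI h (t.take k), diffI ((h :: t)[k]) (t.drop k), ?_, ?_, ?_, ?_, ?_⟩
    · rw [diffI_split t h k (by omega)]
      congr 2
      exact List.getD_eq_getElem _ 0 hklen
    · have : (diffI h (t.take k)).length = k := by
        rw [diffI_length, List.length_take]; omega
      intro hnil; rw [hnil] at this; simp at this; omega
    · have : (diffI ((h :: t)[k]) (t.drop k)).length = t.length - k := by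
        rw [diffI_length, List.length_drop]
      intro hnil; rw [hnil] at this; simp at this; omega
    · intro x hx; simpa using hleft x hx
    · intro x hx; simpa using hright x hx
  · rintro ⟨a, b, hsplit, ha, hb, hpa, hpb⟩
    have hka : 1 ≤ a.length := by cases a with | nil => simp at ha | cons _ _ => simp
    have hkb : 1 ≤ b.length := by cases b with | nil => simp at hb | cons _ _ => simp
    set k := a.length with hkl
    have hlen : k + b.length = t.length := by
      have hc := congrArg List.length hsplit
      rw [diffI_length, List.length_append] at hc
      omega
    have hkn : k < t.length := by omega
    have hklen : k < (h :: t).length := by simp; omega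
    set g : Nat → Int := fun i => (h :: t).getD i 0 with hg
    have hstepA : ∀ i, i < k → g i < g (i+1) := by
      intro i hi
      have hd := diffI_getD t h i (by omega)
      rw [hsplit, List.getD_append _ _ _ _ (by omega)] at hd
      have hmem : a.getD i 0 ∈ a := by
        rw [List.getD_eq_getElem a 0 (by omega)]; exact List.getElem_mem _
      have := hpa _ hmem
      simp only [hg]; omega
    have hstepB : ∀ i, k ≤ i → i < t.length → g (i+1) < g i := by
      intro i hi1 hi2
      have hd := diffI_getD t h i (by omega)
      rw [hsplit, List.getD_append_right _ _ _ _ (by omega)] at hd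
      have hmem : b.getD (i - a.length) 0 ∈ b := by
        rw [List.getD_eq_getElem b 0 (by omega)]; exact List.getElem_mem _
      have := hpb _ hmem
      simp only [hg]; omega
    have hup : ∀ i, i < k → g i < g k := fun i hi =>
      chain_up g i k hi (fun j h1 h2 => hstepA j (by omega))
    have hdown : ∀ j, k < j → j ≤ t.length → g j < g k := fun j h1 h2 =>
      chain_down g k j h1 (fun i hi1 hi2 => hstepB i hi1 (by omega))
    have hgk_mem : g k ∈ (h :: t) := by
      simp only [hg]
      rw [List.getD_eq_getElem _ 0 hklen]; exact List.getElem_mem _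
    -- the maximum is g k
    obtain ⟨m, hm⟩ : ∃ m, PySem.List.max? (h :: t) (fun y => y) = some m := by
      cases hmm : PySem.List.max? (h :: t) (fun y => y) with
      | none => exact absurd ((PySem.List.max?_eq_none_iff _ _).mp hmm) (by simp)
      | some m => exact ⟨m, rfl⟩
    have hmem := PySem.List.max?_mem hm
    have hmax := PySem.List.max?_isMax hm
    have hmgk : m = g k := by
      obtain ⟨i, hi, hie⟩ := List.mem_iff_getElem.mp hmem
      have higD : m = g i := by
        simp only [hg]
        rw [List.getD_eq_getElem _ 0 hi, hie]
      have hin : i ≤ t.length := by simp at hi; omega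
      rcases lt_trichotomy i k with hik | hik | hik
      · have := hup i hik; have h2 := hmax (g k) hgk_mem; simp at h2; omega
      · rw [higD, hik]
      · have := hdown i hik hin; have h2 := hmax (g k) hgk_mem; simp at h2; omega
    -- index of the maximum is k
    have hidx : PySem.List.index? (h :: t) (g k) = some k := by
      rw [PySem.List.index?_eq_some_iff]
      refine ⟨(h :: t).take k, (h :: t).drop (k+1), ?_, ?_, ?_⟩
      · conv_lhs => rw [← List.take_append_drop k (h :: t)]
        rw [List.drop_eq_getElem_cons hklen]
        congr 2
        simp only [hg]
        rw [List.getD_eq_getElem _ 0 hklen]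
      · rw [List.length_take]; omega
      · intro hmem2
        rw [List.mem_take_iff_getElem] at hmem2
        obtain ⟨i, hi, hie⟩ := hmem2
        have hik : i < k := by omega
        have : g i < g k := hup i hik
        rw [← hie] at this
        simp only [hg] at this
        rw [List.getD_eq_getElem _ 0 (by simp at hi ⊢; omega)] at this
        exact absurd this (lt_irrefl _)
    -- now evaluate the port
    simp only [strict_peak, hm, Option.getD_some, hmgk, hidx, Bool.and_eq_true,
      decide_eq_true_eq]
    refine ⟨⟨⟨by omega, ?_⟩, ?_⟩, ?_⟩
    · have : ((h :: t).length : Int) = (t.length : Int) + 1 := by simp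
      omega
    · rw [slice_take_cons, zipall_lt, List.all_eq_true]
      have hEq : diffI h (t.take k) = a := by
        have hs := diffI_split t h k (by omega)
        rw [hsplit] at hs
        have hlena : a.length = (diffI h (t.take k)).length := by
          rw [diffI_length, List.length_take]; omega
        exact (List.append_inj hs.symm hlena.symm).1
      rw [hEq]
      intro x hx; simpa using hpa x hx
    · rw [PySem.List.slice_from_natCast, List.drop_eq_getElem_cons hklen,
        List.drop_succ_cons, zipall_gt, List.all_eq_true]
      have hEq : diffI ((h :: t)[k]) (t.drop k) = b := by
        have hs := diffI_split t h k (by omega)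
        rw [hsplit] at hs
        have hgdk : (h :: t).getD k 0 = (h :: t)[k] := List.getD_eq_getElem _ 0 hklen
        rw [hgdk] at hs
        have hlena : a.length = (diffI h (t.take k)).length := by
          rw [diffI_length, List.length_take]; omega
        exact (List.append_inj hs.symm hlena.symm).2
      rw [hEq]
      intro x hx; simpa using hpb x hx

theorem strict_peak_neg_iff (h : Int) (t : List Int) :
    strict_peak ((h :: t).map (fun x => -x)) = true ↔
      ∃ a b : List Int, diffI h t = a ++ b ∧ a ≠ [] ∧ b ≠ [] ∧
        (∀ x ∈ a, x < 0) ∧ (∀ x ∈ b, 0 < x) := by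
  rw [List.map_cons, strict_peak_iff]
  unfold PeakShape
  rw [diffI_map_neg]
  constructor
  · rintro ⟨a, b, hsplit, ha, hb, hpa, hpb⟩
    refine ⟨a.map (fun x => -x), b.map (fun x => -x), ?_, by simp [ha], by simp [hb], ?_, ?_⟩
    · have hc := congrArg (List.map (fun x : Int => -x)) hsplit
      simpa using hc
    · intro x hx
      simp only [List.mem_map] at hx
      obtain ⟨y, hy, rfl⟩ := hx
      have := hpa y hy; omega
    · intro x hx
      simp only [List.mem_map] at hx
      obtain ⟨y, hy, rfl⟩ := hx
      have := hpb y hy; omega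
  · rintro ⟨a, b, hsplit, ha, hb, hpa, hpb⟩
    refine ⟨a.map (fun x => -x), b.map (fun x => -x), ?_, by simp [ha], by simp [hb], ?_, ?_⟩
    · have hc := congrArg (List.map (fun x : Int => -x)) hsplit
      simpa using hc
    · intro x hx
      simp only [List.mem_map] at hx
      obtain ⟨y, hy, rfl⟩ := hx
      have := hpa y hy; omega
    · intro x hx
      simp only [List.mem_map] at hx
      obtain ⟨y, hy, rfl⟩ := hx
      have := hpb y hy; omega

theorem signs_split (x : Int) (t' : List Int) :
    transCount (decide (0 < x)) (t'.map (fun d => decide (0 < d))) = 1 ↔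
    ∃ a b : List Int, x :: t' = a ++ b ∧ a ≠ [] ∧ b ≠ [] ∧
      (∀ y ∈ a, decide (0 < y) = decide (0 < x)) ∧
      (∀ y ∈ b, decide (0 < y) = !decide (0 < x)) := by
  rw [transCount_one]
  constructor
  · rintro ⟨i, j, hmap⟩
    have hlen : t'.length = i + (j + 1) := by
      have hc := congrArg List.length hmap
      simpa using hc
    refine ⟨(x :: t').take (i+1), (x :: t').drop (i+1),
      (List.take_append_drop _ _).symm, by simp [List.take_succ_cons], ?_, ?_, ?_⟩
    · have hl : ((x :: t').drop (i+1)).length = j + 1 := by simp; omega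
      intro hnil; rw [hnil] at hl; simp at hl
    · intro y hy
      rw [List.take_succ_cons] at hy
      rcases List.mem_cons.mp hy with rfl | hy'
      · rfl
      · have hmy : decide (0 < y) ∈ (t'.map (fun d => decide (0 < d))).take i := by
          rw [← List.map_take]
          exact List.mem_map_of_mem hy'
        rw [hmap, List.take_append_of_le_length (by simp), List.take_replicate] at hmy
        have := List.eq_of_mem_replicate hmy
        rw [this]
    · intro y hy
      rw [List.drop_succ_cons] at hy
      have hmy : decide (0 < y) ∈ (t'.map (fun d => decide (0 < d))).drop i := by
        rw [← List.map_drop]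
        exact List.mem_map_of_mem hy
      rw [hmap, List.drop_append_of_le_length (by simp), List.drop_replicate] at hmy
      simp only [Nat.sub_self] at hmy
      exact List.eq_of_mem_replicate hmy
  · rintro ⟨a, b, hsplit, ha, hb, hsa, hsb⟩
    obtain ⟨a0, a', rfl⟩ : ∃ a0 a', a = a0 :: a' := by
      cases a with
      | nil => exact absurd rfl ha
      | cons a0 a' => exact ⟨a0, a', rfl⟩
    obtain ⟨b0, b', rfl⟩ : ∃ b0 b', b = b0 :: b' := by
      cases b with
      | nil => exact absurd rfl hb
      | cons b0 b' => exact ⟨b0, b', rfl⟩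
    rw [List.cons_append, List.cons.injEq] at hsplit
    refine ⟨a'.length, b'.length, ?_⟩
    rw [hsplit.2, List.map_append, List.map_cons]
    have h1 : a'.map (fun d => decide (0 < d)) = List.replicate a'.length (decide (0 < x)) := by
      have : (a'.map (fun d => decide (0 < d))).length = a'.length := by simp
      rw [← this]
      apply List.eq_replicate_of_mem
      intro y hy
      simp only [List.mem_map] at hy
      obtain ⟨z, hz, rfl⟩ := hy
      exact hsa z (List.mem_cons_of_mem _ hz)
    have h2 : b'.map (fun d => decide (0 < d)) = List.replicate b'.length (!decide (0 < x)) := by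
      have : (b'.map (fun d => decide (0 < d))).length = b'.length := by simp
      rw [← this]
      apply List.eq_replicate_of_mem
      intro y hy
      simp only [List.mem_map] at hy
      obtain ⟨z, hz, rfl⟩ := hy
      exact hsb z (List.mem_cons_of_mem _ hz)
    rw [h1, h2, List.replicate_succ, hsb b0 List.mem_cons_self]

theorem head_mem_of_append (x : Int) (t' a b : List Int) (ha : a ≠ [])
    (hsplit : x :: t' = a ++ b) : x ∈ a := by
  cases a with
  | nil => exact absurd rfl ha
  | cons a0 a' =>
    rw [List.cons_append, List.cons.injEq] at hsplit
    rw [hsplit.1]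
    exact List.mem_cons_self

theorem main_equiv (h c : Int) (r : List Int) :
    (if ((c - h) :: diffI c r).any (fun d => d == 0) then false
     else decide (transCount (decide (0 < c - h))
            ((diffI c r).map (fun d => decide (0 < d))) = 1))
    = (strict_peak (h :: c :: r) || strict_peak ((h :: c :: r).map (fun x => -x))) := by
  have hds : diffI h (c :: r) = (c - h) :: diffI c r := rfl
  by_cases hz : ((c - h) :: diffI c r).any (fun d => d == 0) = true
  · rw [if_pos hz]
    have hd0m : (0 : Int) ∈ (c - h) :: diffI c r := by
      have h0 : c - h = 0 ∨ (0 : Int) ∈ diffI c r := by simpa [List.any_eq_true] using hz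
      rcases h0 with h0 | h0
      · simp [h0]
      · exact List.mem_cons_of_mem _ h0
    symm
    rw [Bool.or_eq_false_iff]
    constructor
    · rw [Bool.eq_false_iff]
      intro hsp
      obtain ⟨a, b, hsplit, -, -, hpa, hpb⟩ := (strict_peak_iff h (c :: r)).mp hsp
      rw [← hds, hsplit] at hd0m
      rcases List.mem_append.mp hd0m with hm | hm
      · have := hpa _ hm; omega
      · have := hpb _ hm; omega
    · rw [Bool.eq_false_iff]
      intro hsp
      obtain ⟨a, b, hsplit, -, -, hpa, hpb⟩ := (strict_peak_neg_iff h (c :: r)).mp hsp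
      rw [← hds, hsplit] at hd0m
      rcases List.mem_append.mp hd0m with hm | hm
      · have := hpa _ hm; omega
      · have := hpb _ hm; omega
  · rw [if_neg hz]
    have hnz : ∀ d ∈ (c - h) :: diffI c r, d ≠ 0 := by
      intro d hd hd0
      exact hz (List.any_eq_true.mpr ⟨d, hd, by simp [hd0]⟩)
    have hx0 : c - h ≠ 0 := hnz _ List.mem_cons_self
    have hSS := signs_split (c - h) (diffI c r)
    by_cases hP : transCount (decide (0 < c - h))
        ((diffI c r).map (fun d => decide (0 < d))) = 1
    · rw [decide_eq_true hP]
      symm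
      rw [Bool.or_eq_true]
      obtain ⟨a, b, hsplit, ha, hb, hsa, hsb⟩ := hSS.mp hP
      by_cases hx : 0 < c - h
      · left
        rw [strict_peak_iff]
        refine ⟨a, b, by rw [hds]; exact hsplit, ha, hb, ?_, ?_⟩
        · intro y hy
          have := hsa y hy
          simp only [decide_eq_true hx] at this
          exact of_decide_eq_true this
        · intro y hy
          have hs := hsb y hy
          simp only [decide_eq_true hx, Bool.not_true] at hs
          have hy0 : y ≠ 0 := hnz y (by rw [hsplit]; exact List.mem_append_right _ hy)
          have := of_decide_eq_false hs
          omega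
      · have hxneg : c - h < 0 := by omega
        right
        rw [strict_peak_neg_iff]
        refine ⟨a, b, by rw [hds]; exact hsplit, ha, hb, ?_, ?_⟩
        · intro y hy
          have hs := hsa y hy
          rw [decide_eq_false hx] at hs
          have hy0 : y ≠ 0 := hnz y (by rw [hsplit]; exact List.mem_append_left _ hy)
          have := of_decide_eq_false hs
          omega
        · intro y hy
          have hs := hsb y hy
          rw [decide_eq_false hx] at hs
          simp only [Bool.not_false] at hs
          exact of_decide_eq_true hs
    · rw [decide_eq_false hP]
      symm
      rw [Bool.or_eq_false_iff]
      constructor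
      · rw [Bool.eq_false_iff]
        intro hsp
        obtain ⟨a, b, hsplit, ha, hb, hpa, hpb⟩ := (strict_peak_iff h (c :: r)).mp hsp
        rw [hds] at hsplit
        have hx : 0 < c - h := hpa _ (head_mem_of_append _ _ _ _ ha hsplit)
        apply hP
        rw [hSS]
        refine ⟨a, b, hsplit, ha, hb, ?_, ?_⟩
        · intro y hy
          rw [decide_eq_true hx, decide_eq_true (hpa y hy)]
        · intro y hy
          rw [decide_eq_true hx, Bool.not_true, decide_eq_false (by have := hpb y hy; omega)]
      · rw [Bool.eq_false_iff]
        intro hsp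
        obtain ⟨a, b, hsplit, ha, hb, hpa, hpb⟩ := (strict_peak_neg_iff h (c :: r)).mp hsp
        rw [hds] at hsplit
        have hx : c - h < 0 := hpa _ (head_mem_of_append _ _ _ _ ha hsplit)
        apply hP
        rw [hSS]
        refine ⟨a, b, hsplit, ha, hb, ?_, ?_⟩
        · intro y hy
          rw [decide_eq_false (by omega : ¬ (0 < c - h)), decide_eq_false (by have := hpa y hy; omega)]
        · intro y hy
          rw [decide_eq_false (by omega : ¬ (0 < c - h)), Bool.not_false, decide_eq_true (hpb y hy)]

-- ===== VERDICT (by name: the statement is the Claim_ definition above) =====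
theorem is_single_change_num_spec : Claim_equal_is_single_change_num := by
  intro num _ _
  unfold Spec_is_single_change_num is_single_change_num is_single_change_num_alt
  cases hs : (PySem.Int.toStr num).toList with
  | nil => simp
  | cons p rest =>
    by_cases hlen : rest.length + 1 < 3
    · simp [hlen]
    · have h0 : PySem.List.enumerate (p :: rest) = (0, p) :: PySem.List.enumerate rest 1 := by
        simpa using PySem.List.enumerate_cons (x := p) (xs := rest) (s := 0)
      have hA : isc_loop (p :: rest) (PySem.List.enumerate (p :: rest)) none 0
          = pairLoop 1 p rest none 0 := by
        rw [h0, isc_loop_zero]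
        simpa using isc_loop_eq_pairLoop rest [] p none 0
      simp only [List.length_cons, hlen, if_false, hA]
      cases rest with
      | nil => simp at hlen
      | cons ch r =>
        rw [List.map_cons, List.map_cons,
          ← main_equiv (pyIntChar p) (pyIntChar ch) (r.map pyIntChar),
          ← diffsOf_eq_diffI]
        by_cases heq : pyIntChar ch = pyIntChar p
        · have hnone : pairLoop 1 p (ch :: r) none 0 = none := by
            simp [pairLoop, heq]
          rw [hnone, if_pos]
          simp [heq]
        · have hd0 : ¬ ((pyIntChar ch - pyIntChar p) == 0) = true := by
            simp [sub_eq_zero]; exact heq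
          set isInc : Bool := decide (pyIntChar p < pyIntChar ch) with hIncDef
          have hstep : pairLoop 1 p (ch :: r) none 0 = pairLoop 2 ch r (some isInc) 0 := by
            simp only [pairLoop, heq, if_false, ← hIncDef]
            cases hI : isInc <;> simp
          rw [hstep, pairLoop_some r ch 2 isInc 0 (by omega)]
          have hsign : isInc = decide (0 < pyIntChar ch - pyIntChar p) := by
            rw [hIncDef]; simp only [decide_eq_decide]; omega
          simp only [List.any_cons, hd0, Bool.false_or]
          by_cases hz : (diffsOf ch r).any (fun d => d == 0) = true
          · rw [if_pos hz, if_pos hz]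
          · rw [if_neg hz, if_neg hz, ← hsign]
            apply Bool.eq_iff_iff.mpr
            simp [beq_iff_eq]
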